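-- pv_equiv track=rewrite | github.com/SherzodOtajonov/cp-stuff | codeforces/2020/problemset/round_2.py | solve
-- ===== SOURCE A (Python) =====
-- def solve(n, k):
--     c = 0
--     a = 0
--     while c!=k:
--         a+=1
--         if a%3 !=0:
--             c+=1
--     return a
-- ===== SOURCE B (Python) =====
-- def solve(n, k):
--     # k-th positive integer not divisible by 3, in closed form.
--     return 0 if k <= 0 else (3 * k - 1) // 2
-- ===== Notes on version B (the rewrite author's own statement) =====
-- stated objective: faster
-- what changed: Replaces the counting while-loop with the closed form (3*k-1)//2 (0 for k=0).
import Mathlib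
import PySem

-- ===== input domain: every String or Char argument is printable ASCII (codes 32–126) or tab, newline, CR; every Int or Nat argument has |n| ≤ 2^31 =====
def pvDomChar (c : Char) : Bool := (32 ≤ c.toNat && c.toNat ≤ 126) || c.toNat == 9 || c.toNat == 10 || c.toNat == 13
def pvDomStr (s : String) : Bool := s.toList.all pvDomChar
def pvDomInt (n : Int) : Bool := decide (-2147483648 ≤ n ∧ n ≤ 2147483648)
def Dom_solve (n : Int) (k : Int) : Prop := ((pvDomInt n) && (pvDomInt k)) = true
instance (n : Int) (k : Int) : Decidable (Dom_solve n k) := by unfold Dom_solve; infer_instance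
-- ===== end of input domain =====

-- B replaces A's counting while-loop by the closed form (3k-1)//2 (0 for k=0): O(1) instead of O(k).


-- ===== PORT A =====
-- while c != k: a += 1; if a % 3 != 0: c += 1   (fuel only makes the loop total; 2*k+2 steps always suffice on Pre_)
def solveLoop : Nat → Int → Int → Int → Int
  | 0, _, _, a => a
  | fuel + 1, k, c, a =>
    if c = k then a
    else
      let a' := a + 1
      if PySem.Int.mod a' 3 ≠ 0 then solveLoop fuel k (c + 1) a'
      else solveLoop fuel k c a'

def solve (n : Int) (k : Int) : Int := solveLoop (2 * k.toNat + 2) k 0 0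

-- ===== PORT B =====
def solve_alt (n : Int) (k : Int) : Int :=
  if k ≤ 0 then 0 else PySem.Int.floordiv (3 * k - 1) 2

-- ===== PRECONDITION & SPEC =====
-- A's while-loop never terminates for k < 0 (the counter only grows past it), so Pre_ requires 0 ≤ k.
def Pre_solve (n : Int) (k : Int) : Prop := 0 ≤ k
instance (n : Int) (k : Int) : Decidable (Pre_solve n k) := by unfold Pre_solve; infer_instance
def pvWitness_solve : Int × Int := (0, 5)

def Spec_solve (n : Int) (k : Int) (out : Int) : Prop := out = solve_alt n k
instance (n : Int) (k : Int) (out : Int) : Decidable (Spec_solve n k out) := by unfold Spec_solve; infer_instance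

-- ===== CLAIM (what is proved, stated in full; the proofs are below) =====
def Claim_equal_solve : Prop := ∀ (n : Int) (k : Int), Dom_solve n k → Pre_solve n k → Spec_solve n k (solve n k)

-- ===== LEMMAS AND PROOFS =====

-- Loop invariant: at the loop head, c counts the non-multiples of 3 in [1..a];
-- apart from unreachable exits, a is last-counted (a = 0, or c < k, or a % 3 ≠ 0).
lemma solveLoop_inv (fuel : Nat) : ∀ (k c a : Int),
    0 ≤ a → c = a - a / 3 → c ≤ k → (a = 0 ∨ c < k ∨ a % 3 ≠ 0) →
    solve_alt 0 k - a < fuel →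
    solveLoop fuel k c a = solve_alt 0 k := by
  induction fuel with
  | zero =>
    intro k c a ha hc hck _ hfuel
    exfalso
    simp only [solve_alt] at hfuel
    split at hfuel
    · omega
    · rw [PySem.Int.floordiv_eq_ediv_of_pos (by omega)] at hfuel; omega
  | succ f ih =>
    intro k c a ha hc hck hlast hfuel
    rw [solveLoop]
    split
    · -- exit: c = k; the invariants pin a = solve_alt 0 k
      rename_i hck'
      simp only [solve_alt]
      split
      · omega
      · rw [PySem.Int.floordiv_eq_ediv_of_pos (by omega)]
        omega
    · rename_i hne
      have hclt : c < k := lt_of_le_of_ne hck hne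
      have hmod : PySem.Int.mod (a + 1) 3 = (a + 1) % 3 :=
        PySem.Int.mod_eq_emod_of_pos (by omega)
      have hfuel' : solve_alt 0 k - (a + 1) < f := by omega
      by_cases h3 : (a + 1) % 3 = 0
      · rw [if_neg (by simp [hmod, h3])]
        exact ih k c (a + 1) (by omega) (by omega) hck (by omega) hfuel'
      · rw [if_pos (by simp [hmod, h3])]
        exact ih k (c + 1) (a + 1) (by omega) (by omega) (by omega) (by omega) hfuel'

lemma solve_alt_n_irrel (n k : Int) : solve_alt n k = solve_alt 0 k := rfl

-- ===== VERDICT (by name: the statement is the Claim_ definition above) =====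
theorem solve_spec : Claim_equal_solve := by
  intro n k _ hk
  show solve n k = solve_alt n k
  rw [solve, solve_alt_n_irrel]
  apply solveLoop_inv
  · omega
  · omega
  · exact hk
  · left; rfl
  · simp only [solve_alt]
    split
    · omega
    · rw [PySem.Int.floordiv_eq_ediv_of_pos (by omega)]; omega
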